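-- pv_equiv track=rewrite | github.com/effuone/AcademyPythonCourse | 4.Lesson/main.py | get_indexes_of_symbols
-- ===== SOURCE A (Python) =====
-- def get_indexes_of_symbols(str):
--     dictionary = {}
--     for i in range(0, len(str)):
--         symbol = str[i]
--         if(dictionary.get(symbol)):
--             dictionary[symbol].append(i)
--             continue
--         dictionary.update({str[i]:[i]})
--     return dictionary
-- ===== SOURCE B (Python) =====
-- def get_indexes_of_symbols(str):
--     # For each distinct character (first-appearance order), rescan the whole
--     # string collecting the positions where it occurs.
--     return {c: [i for i, ch in enumerate(str) if ch == c]
--             for c in dict.fromkeys(str)}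
-- ===== Notes on version B (the rewrite author's own statement) =====
-- stated objective: idiomatic
-- what changed: A builds the dict in one accumulating pass with a truthiness-guarded append/insert; B first computes the distinct characters in first-appearance order (dict.fromkeys) and then builds each character's index list by an independent full scan with enumerate, as a dict comprehension.
import Mathlib
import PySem

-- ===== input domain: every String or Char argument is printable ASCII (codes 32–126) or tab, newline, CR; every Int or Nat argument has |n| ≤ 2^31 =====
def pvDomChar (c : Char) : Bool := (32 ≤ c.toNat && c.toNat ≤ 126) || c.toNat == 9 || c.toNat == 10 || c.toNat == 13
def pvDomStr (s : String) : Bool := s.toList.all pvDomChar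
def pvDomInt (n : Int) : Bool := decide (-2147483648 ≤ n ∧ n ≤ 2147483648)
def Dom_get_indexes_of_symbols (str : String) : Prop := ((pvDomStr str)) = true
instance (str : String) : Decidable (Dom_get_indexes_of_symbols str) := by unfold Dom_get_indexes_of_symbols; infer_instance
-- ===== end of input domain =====

-- B replaces A's single accumulating dict pass by a dict comprehension over the distinct
-- characters (first-appearance order), rescanning the string per character (idiomatic; not faster).

-- ===== PORT A =====
-- Python's 1-char strings str[i] are modelled as Char keys; the returned dict's items are
-- rendered with 1-char String keys at the end, matching the List (String × List Int) convention.
def get_indexes_of_symbols (str : String) : List (String × List Int) :=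
  (((PySem.List.pyRange 0 (PySem.Str.len str)).foldl (fun d i =>
      match PySem.Str.pyGet? str i with            -- i ∈ range(len(str)): always some
      | some symbol =>
          if (d.get? symbol).getD [] ≠ [] then     -- 'if dictionary.get(symbol):' (truthiness)
            d.modify symbol [] (· ++ [i])          -- dictionary[symbol].append(i)
          else
            d.insert symbol [i]                    -- dictionary.update({str[i]: [i]})
      | none => d)
      PySem.Dict.empty : PySem.Dict Char (List Int)).items).map
    (fun p => (String.ofList [p.1], p.2))

-- ===== PORT B =====
def get_indexes_of_symbols_alt (str : String) : List (String × List Int) :=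
  (PySem.List.dedup str.toList).map (fun c =>
    (String.ofList [c],
     ((PySem.List.enumerate str.toList).filter (fun p => p.2 == c)).map (·.1)))

-- ===== PRECONDITION & SPEC =====
def Spec_get_indexes_of_symbols (str : String) (out : List (String × List Int)) : Prop := out = get_indexes_of_symbols_alt str
instance (str : String) (out : List (String × List Int)) : Decidable (Spec_get_indexes_of_symbols str out) := by unfold Spec_get_indexes_of_symbols; infer_instance

-- ===== CLAIM (what is proved, stated in full; the proofs are below) =====
def Claim_equal_get_indexes_of_symbols : Prop := ∀ (str : String), Dom_get_indexes_of_symbols str → Spec_get_indexes_of_symbols str (get_indexes_of_symbols str)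

-- ===== LEMMAS AND PROOFS =====

-- A's loop body is always exactly 'modify symbol [] (· ++ [i])': when the guard is false the
-- current value defaults to [], so the overwriting insert stores [] ++ [i] = [i] as well.
theorem pv_step_eq (d : PySem.Dict Char (List Int)) (c : Char) (i : Int) :
    (if (d.get? c).getD [] ≠ [] then d.modify c [] (· ++ [i]) else d.insert c [i])
      = d.modify c [] (· ++ [i]) := by
  by_cases h : (d.get? c).getD [] ≠ []
  · simp [h]
  · rw [not_not] at h
    simp [h, PySem.Dict.modify, PySem.Dict.getD_eq_get?_getD]

-- A's dict equals the grouping fold over the swapped enumerate pairs.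
theorem pv_dict_eq (s : String) :
    ((PySem.List.pyRange 0 (PySem.Str.len s)).foldl (fun d i =>
      match PySem.Str.pyGet? s i with
      | some symbol =>
          if (d.get? symbol).getD [] ≠ [] then d.modify symbol [] (· ++ [i])
          else d.insert symbol [i]
      | none => d) PySem.Dict.empty)
    = ((PySem.List.enumerate s.toList).map Prod.swap).foldl
        (fun d p => d.modify p.1 [] (· ++ [p.2])) PySem.Dict.empty := by
  rw [PySem.List.enumerate_eq_map_pyRange s.toList 'a', List.map_map, List.foldl_map]
  have hlen : PySem.Str.len s = PySem.List.len s.toList := by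
    simp [PySem.Str.len_eq, PySem.List.len]
  rw [hlen]
  apply PySem.List.foldl_congr_mem
  intro d i hi
  have hrange := (PySem.List.mem_pyRange_one).1 hi
  have h1 : i < (s.toList.length : Int) := by
    simpa [PySem.List.len] using hrange.2
  have h1' : i < (s.length : Int) := by simpa using h1
  have hsome : PySem.List.pyGet? s.toList i = some (s.toList[i.toNat]) := by
    simp [PySem.List.pyGet?, PySem.List.pyIdx?, hrange.1, h1']
  have hD : PySem.List.pyGetD s.toList i 'a' = s.toList[i.toNat] :=
    PySem.List.pyGetD_eq_getElem s.toList 'a' hrange.1 h1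
  simp only [PySem.Str.pyGet?_eq, PySem.Chars.pyGet?_eq_listPyGet?, hsome, Function.comp_def,
    Prod.swap, hD]
  exact pv_step_eq d _ i

-- ===== VERDICT (by name: the statement is the Claim_ definition above) =====
theorem get_indexes_of_symbols_spec : Claim_equal_get_indexes_of_symbols := by
  intro s _
  unfold Spec_get_indexes_of_symbols get_indexes_of_symbols get_indexes_of_symbols_alt
  rw [pv_dict_eq]
  set L := (PySem.List.enumerate s.toList).map Prod.swap with hL
  have hnodup : ((L.foldl (fun d p => d.modify p.1 [] (· ++ [p.2])) PySem.Dict.empty)).keys.Nodup := by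
    have := PySem.Dict.nodup_keys_foldl_modify_key (κ := Char) (ν := List Int) L Prod.fst []
      (fun _ p => fun v => v ++ [p.2]) PySem.Dict.empty (by simp [PySem.Dict.keys_empty])
    simpa using this
  have hkeys : ((L.foldl (fun d p => d.modify p.1 [] (· ++ [p.2])) PySem.Dict.empty)).keys
      = PySem.List.dedup s.toList := by
    have := PySem.Dict.keys_foldl_modify_key (κ := Char) (ν := List Int) L Prod.fst []
      (fun _ p => fun v => v ++ [p.2]) PySem.Dict.empty
    simp only [PySem.Dict.keys_empty] at this
    have hm : List.map Prod.fst L = s.toList := by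
      simp [hL, Function.comp_def, PySem.List.map_snd_enumerate]
    rw [hm] at this
    simpa [hL, PySem.List.dedup_eq_ofList, PySem.Set.ofList, PySem.Set.update,
      PySem.Set.empty] using this
  rw [PySem.Dict.items_eq_map_keys _ hnodup [], hkeys, List.map_map]
  apply List.map_congr_left
  intro c _
  have hg := PySem.Dict.getD_foldl_modify_append L PySem.Dict.empty c
  simp only [PySem.Dict.getD_empty, List.nil_append] at hg
  simp only [Function.comp_def]
  rw [hg]
  simp [hL, List.filter_map, Function.comp_def]
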